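-- pv_equiv track=rewrite | github.com/eisenheiim/japaneseprogramminglanguage | hmw5.py | japanesechecker
-- ===== SOURCE A (Python) =====
-- def japanesechecker(word): #checking if the number is in true form.
--     if "," in word:
--         if len(word) >5:
--
--             reversedword = word[::-1]
--             count = 1
--             for char in reversedword:
--                 if char == ",":
--                     if count != 5:
--                         return 0
--
--                     count = 1
--                 else:
--                     count += 1
--
--
--             wordy = word.replace(",", "")
--
--             if wordy.isdigit()!=1:
--                 return 0
--             return 1
--
--
--     elif word.isdigit():
--         return 1
-- ===== SOURCE B (Python) =====
-- def japanesechecker(word):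
--     if "," in word:
--         if len(word) > 5:
--             parts = word.split(",")
--             if all(len(p) == 4 for p in parts[1:]):
--                 return 1 if word.replace(",", "").isdigit() else 0
--             return 0
--     elif word.isdigit():
--         return 1
-- ===== Notes on version B (the rewrite author's own statement) =====
-- stated objective: simpler
-- what changed: Replaces the reversed char-by-char scan with a reset counter by splitting the word on commas once and checking that every group after the first has length 4; Pre_ excludes inputs where A falls through and returns None (comma-containing words of length <= 5, and comma-free words that are not all digits), on which B also returns None.
-- outside the precondition, e.g. on japanesechecker('1,2'): A returns None, B returns None
import Mathlib
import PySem

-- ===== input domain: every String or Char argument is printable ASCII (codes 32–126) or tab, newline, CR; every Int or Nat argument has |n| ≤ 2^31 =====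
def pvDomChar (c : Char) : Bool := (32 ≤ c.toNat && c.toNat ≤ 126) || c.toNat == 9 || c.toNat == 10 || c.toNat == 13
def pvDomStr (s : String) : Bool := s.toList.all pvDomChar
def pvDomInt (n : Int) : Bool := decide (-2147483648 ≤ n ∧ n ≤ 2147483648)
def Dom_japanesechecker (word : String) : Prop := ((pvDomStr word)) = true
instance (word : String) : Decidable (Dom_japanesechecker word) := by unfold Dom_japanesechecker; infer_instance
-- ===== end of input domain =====

-- B replaces A's reversed counter scan by one split on "," plus a length check of every group after the first (simpler, same cost).
-- A returns None (no Int) on comma-words of length ≤ 5 and on comma-free non-digit words; those inputs are outside Pre_.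

-- ===== PORT A =====
-- the for-loop over reversedword with early return 0: state = count, result none = loop fell through
def pvLoopA : List Char → Int → Option Int
  | [], _ => none
  | ch :: rest, count =>
    if ch = ',' then
      if count ≠ 5 then some 0
      else pvLoopA rest 1
    else pvLoopA rest (count + 1)

def japanesechecker (word : String) : Int :=
  if PySem.Str.isIn "," word then
    if 5 < PySem.Str.len word then
      let reversedword := (PySem.List.slice? word.toList none none (-1)).getD []  -- word[::-1]
      match pvLoopA reversedword 1 with
      | some r => r
      | none =>
        let wordy := PySem.Chars.replace word.toList [','] []
        if PySem.Chars.strIsdigit wordy ≠ true then 0 else 1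
    else 0  -- Python falls through (None): outside Pre_
  else
    if PySem.Chars.strIsdigit word.toList then 1 else 0  -- the non-digit fall-through (None) is outside Pre_

-- ===== PORT B =====
def japanesechecker_alt (word : String) : Int :=
  if PySem.Str.isIn "," word then
    if 5 < PySem.Str.len word then
      let parts := PySem.Chars.splitOn word.toList [',']
      if (PySem.List.slice parts (some 1) none).all (fun p => p.length == 4) then
        if PySem.Chars.strIsdigit (PySem.Chars.replace word.toList [','] []) then 1 else 0
      else 0
    else 0  -- fall-through (None): outside Pre_
  else
    if PySem.Chars.strIsdigit word.toList then 1 else 0  -- fall-through (None): outside Pre_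

-- ===== PRECONDITION & SPEC =====
-- Pre_ = exactly the inputs where Python A returns an int rather than falling through with None
def Pre_japanesechecker (word : String) : Prop :=
  (PySem.Str.isIn "," word = true ∧ 5 < PySem.Str.len word) ∨
  (PySem.Str.isIn "," word = false ∧ PySem.Chars.strIsdigit word.toList = true)
instance (word : String) : Decidable (Pre_japanesechecker word) := by unfold Pre_japanesechecker; infer_instance
def pvWitness_japanesechecker : String := "1,0000"

def Spec_japanesechecker (word : String) (out : Int) : Prop := out = japanesechecker_alt word
instance (word : String) (out : Int) : Decidable (Spec_japanesechecker word out) := by unfold Spec_japanesechecker; infer_instance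

-- ===== CLAIM (what is proved, stated in full; the proofs are below) =====
def Claim_equal_japanesechecker : Prop := ∀ (word : String), Dom_japanesechecker word → Pre_japanesechecker word → Spec_japanesechecker word (japanesechecker word)

-- ===== LEMMAS AND PROOFS =====

-- structural model of str.split(",") on a char list
def pvSpl : List Char → List (List Char)
  | [] => [[]]
  | c :: t => if c = ',' then [] :: pvSpl t else (c :: (pvSpl t).headI) :: (pvSpl t).tail

lemma pvSpl_cons (l : List Char) : pvSpl l = (pvSpl l).headI :: (pvSpl l).tail := by
  cases l with
  | nil => rfl
  | cons c t => by_cases h : c = ',' <;> simp [pvSpl, h]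

lemma pvSpl_ne_nil (l : List Char) : pvSpl l ≠ [] := by
  rw [pvSpl_cons l]; exact List.cons_ne_nil _ _

lemma pvGo_spec : ∀ (fuel : Nat) (l cur : List Char) (acc : List (List Char)), l.length ≤ fuel →
    PySem.Chars.splitOn.go [','] fuel l cur acc =
      acc.reverse ++ (cur.reverse ++ (pvSpl l).headI) :: (pvSpl l).tail := by
  intro fuel
  induction fuel with
  | zero =>
    intro l cur acc h
    have : l = [] := List.length_eq_zero_iff.mp (Nat.le_zero.mp h)
    subst this
    simp [PySem.Chars.splitOn.go, pvSpl]
  | succ f ih =>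
    intro l cur acc h
    cases l with
    | nil => simp [PySem.Chars.splitOn.go, pvSpl]
    | cons c rest =>
      by_cases hc : c = ','
      · subst hc
        rw [PySem.Chars.splitOn.go]
        simp only [List.isPrefixOf, beq_self_eq_true, Bool.true_and,
          if_pos, List.length_singleton, List.drop_one, List.tail_cons]
        rw [ih rest [] (cur.reverse :: acc) (by simpa using Nat.lt_succ_iff.mp (by simpa using h))]
        simp [pvSpl]
        rw [pvSpl_cons rest]
        simp
      · rw [PySem.Chars.splitOn.go]
        have hpre : List.isPrefixOf [','] (c :: rest) = false := by
          simp only [List.isPrefixOf, List.isPrefixOf_nil_left, Bool.and_true]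
          simp only [beq_eq_false_iff_ne, ne_eq]
          exact fun hh => hc hh.symm
        rw [hpre]
        simp only [Bool.false_eq_true, if_false]
        rw [ih rest (c :: cur) acc (by simpa using Nat.lt_succ_iff.mp (by simpa using h))]
        simp [pvSpl, hc]

lemma pvSplitOn_eq (l : List Char) : PySem.Chars.splitOn l [','] = pvSpl l := by
  rw [PySem.Chars.splitOn, pvGo_spec (l.length + 1) l [] [] (Nat.le_succ _)]
  simpa using (pvSpl_cons l).symm

-- appending one char to the split
lemma pvSpl_append (t : List Char) (x : Char) :
    pvSpl (t ++ [x]) =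
      if x = ',' then pvSpl t ++ [[]]
      else (pvSpl t).dropLast ++ [(pvSpl t).getLastD [] ++ [x]] := by
  induction t with
  | nil => by_cases hx : x = ',' <;> simp [pvSpl, hx]
  | cons c t' ih =>
    by_cases hc : c = ','
    · subst hc
      by_cases hx : x = ','
      · simp [pvSpl, hx] at ih ⊢; rw [ih]
      · simp [pvSpl, hx] at ih ⊢
        rw [ih]
        cases h : pvSpl t' with
        | nil => exact absurd h (pvSpl_ne_nil t')
        | cons a b => simp
    · by_cases hx : x = ','
      · simp only [List.cons_append, pvSpl, hc, if_false, hx, if_true] at ih ⊢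
        rw [ih]
        have hne := pvSpl_ne_nil t'
        rw [pvSpl_cons t']
        cases h : pvSpl t' with
        | nil => exact absurd h hne
        | cons a b => simp [h]
      · simp only [List.cons_append, pvSpl, hc, if_false, hx] at ih ⊢
        rw [ih]
        rw [pvSpl_cons t']
        cases h : pvSpl t' with
        | nil => exact absurd h (pvSpl_ne_nil t')
        | cons a b =>
          cases b with
          | nil => simp [h]
          | cons a' b' => simp [h, List.dropLast_cons_of_ne_nil]

lemma pvSpl_reverse (l : List Char) :
    pvSpl l.reverse = ((pvSpl l).map List.reverse).reverse := by
  induction l with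
  | nil => simp [pvSpl]
  | cons c t ih =>
    rw [List.reverse_cons, pvSpl_append, ih]
    by_cases hc : c = ','
    · simp [pvSpl, hc]
    · simp only [hc, if_false, pvSpl]
      rw [pvSpl_cons t]
      cases h : pvSpl t with
      | nil => exact absurd h (pvSpl_ne_nil t)
      | cons a b => simp [h]

-- model of the scan's acceptance condition
def pvChk (c : Int) : List (List Char) → Bool
  | [] => true
  | [_] => true
  | g :: gs => (c + (g.length : Int) == 5) && gs.dropLast.all (fun h => h.length == 4)

lemma pvLoopA_values (l : List Char) (c : Int) : pvLoopA l c = none ∨ pvLoopA l c = some 0 := by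
  induction l generalizing c with
  | nil => left; rfl
  | cons ch rest ih =>
    by_cases h : ch = ','
    · by_cases h5 : c ≠ 5
      · right; simp [pvLoopA, h, h5]
      · simpa [pvLoopA, h, h5] using ih 1
    · simpa [pvLoopA, h] using ih (c + 1)

lemma pvChk_one (L : List (List Char)) (hL : L ≠ []) :
    pvChk 1 L = L.dropLast.all (fun g => g.length == 4) := by
  cases L with
  | nil => exact absurd rfl hL
  | cons g gs =>
    cases gs with
    | nil => simp [pvChk]
    | cons g' gs' =>
      show ((1 + (g.length : Int) == 5) && (g' :: gs').dropLast.all (fun h => h.length == 4)) = _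
      rw [List.dropLast_cons_of_ne_nil (List.cons_ne_nil g' gs')]
      have : (1 + (g.length : Int) == 5) = (g.length == 4) := by
        rcases Bool.eq_false_or_eq_true (g.length == 4) with h | h <;>
          simp_all <;> omega
      simp [this]

lemma pvLoopA_iff (l : List Char) (c : Int) :
    pvLoopA l c = none ↔ pvChk c (pvSpl l) = true := by
  induction l generalizing c with
  | nil => simp [pvLoopA, pvSpl, pvChk]
  | cons ch rest ih =>
    by_cases h : ch = ','
    · subst h
      show (if c ≠ 5 then some 0 else pvLoopA rest 1) = none ↔ _
      have hsplit : pvSpl (',' :: rest) = [] :: (pvSpl rest).headI :: (pvSpl rest).tail := by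
        rw [pvSpl]; simp; exact pvSpl_cons rest
      rw [hsplit]
      show _ ↔ ((c + ((0:Nat) : Int) == 5) && ((pvSpl rest).headI :: (pvSpl rest).tail).dropLast.all
        (fun h => h.length == 4)) = true
      rw [← pvSpl_cons rest, ← pvChk_one _ (pvSpl_ne_nil rest)]
      by_cases h5 : c = 5
      · simp [h5, ih 1]
      · simp [h5]
    · have hstep : pvLoopA (ch :: rest) c = pvLoopA rest (c + 1) := by simp [pvLoopA, h]
      rw [hstep, ih (c + 1)]
      have hsplit : pvSpl (ch :: rest) = (ch :: (pvSpl rest).headI) :: (pvSpl rest).tail := by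
        rw [pvSpl]; simp [h]
      rw [hsplit]
      rw [pvSpl_cons rest]
      cases htl : (pvSpl rest).tail with
      | nil => simp [pvChk]
      | cons a b =>
        show ((c + 1 + ((pvSpl rest).headI.length : Int) == 5) && _) = true ↔
          ((c + ((ch :: (pvSpl rest).headI).length : Int) == 5) && _) = true
        have : (c + 1 + ((pvSpl rest).headI.length : Int) == 5) =
            (c + ((ch :: (pvSpl rest).headI).length : Int) == 5) := by
          rcases Bool.eq_false_or_eq_true (c + 1 + ((pvSpl rest).headI.length : Int) == 5) with h' | h' <;>
            simp_all <;> omega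
        rw [this]
        simp

-- the scan accepts iff every group after the first has length 4
lemma pvScan_eq_groups (l : List Char) :
    (pvLoopA l.reverse 1 = none) ↔ (pvSpl l).tail.all (fun p => p.length == 4) = true := by
  rw [pvLoopA_iff, pvChk_one _ (pvSpl_ne_nil l.reverse), pvSpl_reverse,
    List.dropLast_reverse, List.all_reverse]
  rw [show ((pvSpl l).map List.reverse).tail = ((pvSpl l).tail).map List.reverse from
    List.map_tail.symm, List.all_map]
  simp [Function.comp]

-- ===== VERDICT (by name: the statement is the Claim_ definition above) =====
theorem japanesechecker_spec : Claim_equal_japanesechecker := by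
  intro word _ _
  unfold Spec_japanesechecker japanesechecker japanesechecker_alt
  by_cases h1 : PySem.Str.isIn "," word = true
  · rw [if_pos h1, if_pos h1]
    by_cases h2 : 5 < PySem.Str.len word
    · rw [if_pos h2, if_pos h2]
      rw [PySem.List.slice?_none_none_neg_one]
      simp only [Option.getD_some]
      rw [pvSplitOn_eq, PySem.List.slice_from_one]
      rcases pvLoopA_values word.toList.reverse 1 with h | h
      · have hall := (pvScan_eq_groups word.toList).mp h
        rw [h, if_pos hall]
        cases hd : PySem.Chars.strIsdigit (PySem.Chars.replace word.toList [','] []) <;> simp [hd]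
      · have hfalse : ((pvSpl word.toList).tail.all (fun p => p.length == 4)) = false := by
          rcases Bool.eq_false_or_eq_true ((pvSpl word.toList).tail.all (fun p => p.length == 4))
            with ht | hf
          · exact absurd ((pvScan_eq_groups word.toList).mpr ht) (by rw [h]; simp)
          · exact hf
        rw [h, hfalse]
        simp
    · rw [if_neg h2, if_neg h2]
  · rw [if_neg h1, if_neg h1]
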